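-- pv_equiv track=rewrite | github.com/danbnyn/CDT | src/delaunay_triangulation/post_process.py | build_adjacency_map
-- ===== SOURCE A (Python) =====
-- from collections import defaultdict
-- from typing import List, Tuple, Optional, Dict, Set
--
-- def build_adjacency_map(
--     elem2nodes: List[int],
--     p_elem2nodes: List[int]
-- ) -> Dict[int, Set[int]]:
--     """
--     Builds an adjacency map from the flat `elem2nodes` list and its pointer list `p_elem2nodes`.
--
--     Description:
--     This function constructs an adjacency dictionary where each node is mapped to a set of its adjacent nodes
--     by iterating through each triangle defined in the mesh. The adjacency map is essential for graph-based
--     algorithms like the Reverse Cuthill–McKee (RCM) algorithm.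
--
--     Parameters:
--     - elem2nodes (List[int]): Flat list of vertex indices for each triangle.
--     - p_elem2nodes (List[int]): Pointer list indicating the start index of each triangle in `elem2nodes`.
--
--     Returns:
--     - Dict[int, Set[int]]: A dictionary mapping each vertex index to a set of its adjacent vertex indices.
--     """
--     adjacency: Dict[int, Set[int]] = defaultdict(set)
--     numb_elems = len(p_elem2nodes) - 1  # Number of triangles
--
--     for elem_idx in range(numb_elems):
--         start = p_elem2nodes[elem_idx]
--         end = p_elem2nodes[elem_idx + 1]
--         triangle = elem2nodes[start:end]
--
--         if len(triangle) != 3: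
--             continue  # Skip invalid triangles
--
--         u, v, w = triangle
--         # Add edges to the adjacency map
--         adjacency[u].update([v, w])
--         adjacency[v].update([u, w])
--         adjacency[w].update([u, v])
--
--     return adjacency
-- ===== SOURCE B (Python) =====
-- from collections import defaultdict
-- from typing import List, Dict, Set
--
-- def build_adjacency_map(
--     elem2nodes: List[int],
--     p_elem2nodes: List[int]
-- ) -> Dict[int, Set[int]]:
--     # Pass 1: inverse incidence index node -> list of (triangle, position) occurrences,
--     # considering only elements whose block is exactly 3 nodes long.
--     node2occ: Dict[int, list] = {}
--     for i in range(len(p_elem2nodes) - 1):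
--         tri = elem2nodes[p_elem2nodes[i]:p_elem2nodes[i + 1]]
--         if len(tri) == 3:
--             for pos in range(3):
--                 node2occ.setdefault(tri[pos], []).append((tri, pos))
--     # Pass 2: for each node, collect the other two vertices of each incident triangle.
--     adjacency: Dict[int, Set[int]] = defaultdict(set)
--     for u, occs in node2occ.items():
--         s = adjacency[u]
--         for tri, pos in occs:
--             for j in range(3):
--                 if j != pos:
--                     s.add(tri[j])
--     return adjacency
-- ===== Notes on version B (the rewrite author's own statement) =====
-- stated objective: alternative
-- what changed: Replaces A's single pass that updates three adjacency sets per triangle with a two-pass scheme: first build an inverse incidence index node->(triangle,position) over valid 3-node elements, then fill each node's adjacency set from its own incidence list.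
import Mathlib
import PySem

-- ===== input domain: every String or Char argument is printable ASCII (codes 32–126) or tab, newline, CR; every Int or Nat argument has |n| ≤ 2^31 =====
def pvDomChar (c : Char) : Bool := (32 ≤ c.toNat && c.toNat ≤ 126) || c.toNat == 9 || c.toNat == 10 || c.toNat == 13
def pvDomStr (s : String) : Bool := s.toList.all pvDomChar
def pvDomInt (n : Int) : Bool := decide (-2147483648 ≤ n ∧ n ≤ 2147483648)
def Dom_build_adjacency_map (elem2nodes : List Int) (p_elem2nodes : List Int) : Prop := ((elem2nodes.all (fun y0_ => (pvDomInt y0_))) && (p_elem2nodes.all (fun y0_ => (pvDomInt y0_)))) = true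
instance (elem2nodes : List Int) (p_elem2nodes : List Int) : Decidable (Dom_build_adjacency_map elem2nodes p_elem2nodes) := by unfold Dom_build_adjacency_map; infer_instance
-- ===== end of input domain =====

-- B replaces A's one pass of three per-triangle set updates by two passes: an inverse
-- incidence index node -> (triangle, position) over the valid 3-node elements, then a
-- per-node fill of the adjacency set from that index (objective: alternative decomposition).

-- ===== PORT A =====
def build_adjacency_map (elem2nodes : List Int) (p_elem2nodes : List Int) : List (Int × List Int) :=
  let numb_elems : Int := PySem.List.len p_elem2nodes - 1
  let adjacency : PySem.Dict Int (PySem.Set Int) :=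
    (PySem.List.pyRange 0 numb_elems 1).foldl (fun d elem_idx =>
      -- p_elem2nodes[elem_idx] / [elem_idx+1] are always in range (0 ≤ elem_idx < len-1), so pyGetD is exact
      let start := PySem.List.pyGetD p_elem2nodes elem_idx 0
      let stop := PySem.List.pyGetD p_elem2nodes (elem_idx + 1) 0
      let triangle := PySem.List.slice elem2nodes (some start) (some stop)
      if PySem.List.len triangle ≠ 3 then d
      else
        match triangle with
        | [u, v, w] =>
          ((d.modify u [] (fun s => PySem.Set.update s [v, w])).modify v
              [] (fun s => PySem.Set.update s [u, w])).modify w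
            [] (fun s => PySem.Set.update s [u, v])
        | _ => d) PySem.Dict.empty
  adjacency.items

-- ===== PORT B =====
def build_adjacency_map_alt (elem2nodes : List Int) (p_elem2nodes : List Int) : List (Int × List Int) :=
  let node2occ : PySem.Dict Int (List (List Int × Int)) :=
    (PySem.List.pyRange 0 (PySem.List.len p_elem2nodes - 1) 1).foldl (fun d i =>
      -- p_elem2nodes[i] / [i+1] are always in range here, so pyGetD is exact
      let tri := PySem.List.slice elem2nodes
        (some (PySem.List.pyGetD p_elem2nodes i 0))
        (some (PySem.List.pyGetD p_elem2nodes (i + 1) 0))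
      if PySem.List.len tri = 3 then
        (PySem.List.pyRange 0 3 1).foldl (fun d pos =>
          -- tri[pos] with 0 ≤ pos < 3 = len tri, so pyGetD is exact
          d.modify (PySem.List.pyGetD tri pos 0) [] (fun l => l ++ [(tri, pos)])) d
      else d) PySem.Dict.empty
  let adjacency : PySem.Dict Int (PySem.Set Int) :=
    node2occ.items.foldl (fun d p =>
      d.insert p.1 (p.2.foldl (fun s q =>
          (PySem.List.pyRange 0 3 1).foldl (fun s j =>
            if j ≠ q.2 then PySem.Set.add s (PySem.List.pyGetD q.1 j 0) else s) s)
        (d.getD p.1 []))) PySem.Dict.empty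
  adjacency.items

-- ===== PRECONDITION & SPEC =====
def Spec_build_adjacency_map (elem2nodes : List Int) (p_elem2nodes : List Int) (out : List (Int × List Int)) : Prop := out = build_adjacency_map_alt elem2nodes p_elem2nodes
instance (elem2nodes : List Int) (p_elem2nodes : List Int) (out : List (Int × List Int)) : Decidable (Spec_build_adjacency_map elem2nodes p_elem2nodes out) := by unfold Spec_build_adjacency_map; infer_instance

-- ===== CLAIM (what is proved, stated in full; the proofs are below) =====
def Claim_equal_build_adjacency_map : Prop := ∀ (elem2nodes : List Int) (p_elem2nodes : List Int), Dom_build_adjacency_map elem2nodes p_elem2nodes → Spec_build_adjacency_map elem2nodes p_elem2nodes (build_adjacency_map elem2nodes p_elem2nodes)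

-- ===== LEMMAS AND PROOFS =====

def triOf (e : List Int) (pr : Int × Int) : Option (List Int) :=
  if (PySem.List.slice e (some pr.1) (some pr.2)).length = 3
  then some (PySem.List.slice e (some pr.1) (some pr.2)) else none

def tris (e p : List Int) : List (List Int) := (p.zip p.tail).filterMap (triOf e)

def stepA (d : PySem.Dict Int (PySem.Set Int)) (tri : List Int) : PySem.Dict Int (PySem.Set Int) :=
  match tri with
  | [u, v, w] =>
    ((d.modify u [] (fun s => PySem.Set.update s [v, w])).modify v
        [] (fun s => PySem.Set.update s [u, w])).modify w
      [] (fun s => PySem.Set.update s [u, v])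
  | _ => d

def occAdd (s : PySem.Set Int) (tri : List Int) (pos : Int) : PySem.Set Int :=
  (PySem.List.pyRange 0 3 1).foldl (fun s j =>
    if j ≠ pos then PySem.Set.add s (PySem.List.pyGetD tri j 0) else s) s

def chunk (tri : List Int) : List (Int × (List Int × Int)) :=
  [(PySem.List.pyGetD tri 0 0, (tri, 0)), (PySem.List.pyGetD tri 1 0, (tri, 1)),
   (PySem.List.pyGetD tri 2 0, (tri, 2))]

def pairsOf (ts : List (List Int)) : List (Int × (List Int × Int)) := ts.flatMap chunk

def modOcc (d : PySem.Dict Int (PySem.Set Int)) (p : Int × (List Int × Int)) :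
    PySem.Dict Int (PySem.Set Int) :=
  d.modify p.1 [] (fun s => occAdd s p.2.1 p.2.2)

def modIdx (d : PySem.Dict Int (List (List Int × Int))) (p : Int × (List Int × Int)) :
    PySem.Dict Int (List (List Int × Int)) :=
  d.modify p.1 [] (fun l => l ++ [p.2])

theorem aux_range {σ : Type} : ∀ (x : Int) (t : List Int) (g : σ → Int → Int → σ) (init : σ),
    (List.range t.length).foldl
      (fun d k => g d ((x :: t).getD k 0) ((x :: t).getD (k + 1) 0)) init
    = ((x :: t).zip t).foldl (fun d pr => g d pr.1 pr.2) init := by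
  intro x t
  induction t generalizing x with
  | nil => intro g init; simp
  | cons y t ih =>
    intro g init
    rw [List.length_cons, List.range_succ_eq_map, List.foldl_cons, List.foldl_map]
    rw [PySem.List.foldl_congr_mem _ _
      (fun d k => g d ((y :: t).getD k 0) ((y :: t).getD (k + 1) 0)) _
      (by intro acc k hk; simp)]
    rw [ih y]
    simp

theorem foldl_range_pairs {σ : Type} (q : List Int) (g : σ → Int → Int → σ) (init : σ) :
    (PySem.List.pyRange 0 (PySem.List.len q - 1) 1).foldl
      (fun d i => g d (PySem.List.pyGetD q i 0) (PySem.List.pyGetD q (i + 1) 0)) init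
    = (q.zip q.tail).foldl (fun d pr => g d pr.1 pr.2) init := by
  cases q with
  | nil => simp [PySem.List.pyRange_one_eq_nil]
  | cons x t =>
    rw [PySem.List.pyRange_one, List.foldl_map]
    have h1 : ((PySem.List.len (x :: t) - 1) - 0).toNat = t.length := by
      simp [PySem.List.len_eq]
    rw [h1]
    simp only [List.tail_cons]
    rw [← aux_range x t g init]
    apply PySem.List.foldl_congr_mem
    intro d k hk
    have h0 : (0 : Int) + (k : Int) = (k : Int) := by ring
    have h2 : ((k : Int) + 1) = ((k + 1 : Nat) : Int) := by push_cast; ring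
    rw [h0, h2, PySem.List.pyGetD_natCast, PySem.List.pyGetD_natCast]

theorem stepA_chunk (d : PySem.Dict Int (PySem.Set Int)) (tri : List Int)
    (h : tri.length = 3) : stepA d tri = (chunk tri).foldl modOcc d := by
  match tri, h with
  | [u, v, w], _ => rfl

theorem foldA_flat : ∀ (ts : List (List Int)), (∀ t ∈ ts, t.length = 3) →
    ∀ d, ts.foldl stepA d = (pairsOf ts).foldl modOcc d := by
  intro ts
  induction ts with
  | nil => intro _ d; rfl
  | cons t ts ih =>
    intro h3 d
    rw [List.foldl_cons, pairsOf, List.flatMap_cons, List.foldl_append,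
      stepA_chunk d t (h3 t (by simp))]
    exact ih (fun t ht => h3 t (by simp [ht])) _

theorem getD_foldl_modify_fun {β : Type} (F : (Int × β) → PySem.Set Int → PySem.Set Int) :
    ∀ (l : List (Int × β)) (d : PySem.Dict Int (PySem.Set Int)) (x : Int),
    (l.foldl (fun d p => d.modify p.1 [] (F p)) d).getD x []
    = (l.filter (fun p => p.1 == x)).foldl (fun s p => F p s) (d.getD x []) := by
  intro l
  induction l with
  | nil => intro d x; rfl
  | cons p l ih =>
    intro d x
    rw [List.foldl_cons, ih, List.filter_cons]
    by_cases h : p.1 = x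
    · simp [h]
    · simp [h, PySem.Dict.getD_modify, Ne.symm h]

theorem A_items (e p : List Int) :
    build_adjacency_map e p = ((pairsOf (tris e p)).foldl modOcc PySem.Dict.empty).items := by
  show ((PySem.List.pyRange 0 (PySem.List.len p - 1) 1).foldl _ PySem.Dict.empty).items = _
  congr 1
  have h1 := foldl_range_pairs p
    (fun d a b =>
      let triangle := PySem.List.slice e (some a) (some b)
      if PySem.List.len triangle ≠ 3 then d
      else
        match triangle with
        | [u, v, w] =>
          ((d.modify u [] (fun s => PySem.Set.update s [v, w])).modify v
              [] (fun s => PySem.Set.update s [u, w])).modify w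
            [] (fun s => PySem.Set.update s [u, v])
        | _ => d) PySem.Dict.empty
  rw [show (PySem.List.len p - 1) = (PySem.List.len p - 1) from rfl]
  refine Eq.trans h1 ?_
  rw [← foldA_flat (tris e p) (fun t ht => ?_) PySem.Dict.empty]
  · rw [tris, List.foldl_filterMap]
    apply PySem.List.foldl_congr_mem
    intro d pr hpr
    simp only []
    by_cases h : (PySem.List.slice e (some pr.1) (some pr.2)).length = 3
    · rw [triOf, if_pos h]
      have hlen : ¬ (PySem.List.len (PySem.List.slice e (some pr.1) (some pr.2)) ≠ 3) := by
        simp [PySem.List.len_eq, h]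
      rw [if_neg hlen]
      rfl
    · rw [triOf, if_neg h]
      have hlen : PySem.List.len (PySem.List.slice e (some pr.1) (some pr.2)) ≠ 3 := by
        simp [PySem.List.len_eq]
        omega
      rw [if_pos hlen]
  · rw [tris] at ht
    obtain ⟨pr, _, hsome⟩ := List.mem_filterMap.mp ht
    rw [triOf] at hsome
    split at hsome
    · cases hsome; assumption
    · cases hsome

theorem foldl_flatMap_chunk {ν : Type} (m : PySem.Dict Int ν → (Int × (List Int × Int)) → PySem.Dict Int ν) :
    ∀ (ts : List (List Int)) (d : PySem.Dict Int ν),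
    ts.foldl (fun d tri => (chunk tri).foldl m d) d = (pairsOf ts).foldl m d := by
  intro ts
  induction ts with
  | nil => intro d; rfl
  | cons t ts ih =>
    intro d
    rw [List.foldl_cons, pairsOf, List.flatMap_cons, List.foldl_append]
    exact ih _

theorem B_first (e p : List Int) :
    (PySem.List.pyRange 0 (PySem.List.len p - 1) 1).foldl (fun d i =>
      let tri := PySem.List.slice e
        (some (PySem.List.pyGetD p i 0))
        (some (PySem.List.pyGetD p (i + 1) 0))
      if PySem.List.len tri = 3 then
        (PySem.List.pyRange 0 3 1).foldl (fun d pos =>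
          d.modify (PySem.List.pyGetD tri pos 0) [] (fun l => l ++ [(tri, pos)])) d
      else d) PySem.Dict.empty
    = (pairsOf (tris e p)).foldl modIdx PySem.Dict.empty := by
  have h1 := foldl_range_pairs p
    (fun d a b =>
      let tri := PySem.List.slice e (some a) (some b)
      if PySem.List.len tri = 3 then
        (PySem.List.pyRange 0 3 1).foldl (fun d pos =>
          d.modify (PySem.List.pyGetD tri pos 0) [] (fun l => l ++ [(tri, pos)])) d
      else d) PySem.Dict.empty
  refine Eq.trans h1 ?_
  rw [← foldl_flatMap_chunk modIdx (tris e p) PySem.Dict.empty]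
  rw [tris, List.foldl_filterMap]
  apply PySem.List.foldl_congr_mem
  intro d pr hpr
  simp only []
  by_cases h : (PySem.List.slice e (some pr.1) (some pr.2)).length = 3
  · rw [triOf, if_pos h]
    have hlen : PySem.List.len (PySem.List.slice e (some pr.1) (some pr.2)) = 3 := by
      simp [PySem.List.len_eq, h]
    rw [if_pos hlen]
    rfl
  · rw [triOf, if_neg h]
    have hlen : ¬ PySem.List.len (PySem.List.slice e (some pr.1) (some pr.2)) = 3 := by
      simp [PySem.List.len_eq]
      omega
    rw [if_neg hlen]

theorem items_insert_fresh {β : Type} (g : Int → β → PySem.Set Int → PySem.Set Int) :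
    ∀ (L : List (Int × β)) (d : PySem.Dict Int (PySem.Set Int)),
    (L.map Prod.fst).Nodup → (∀ p ∈ L, d.contains p.1 = false) →
    (L.foldl (fun d p => d.insert p.1 (g p.1 p.2 (d.getD p.1 []))) d).items
    = d.items ++ L.map (fun p => (p.1, g p.1 p.2 [])) := by
  intro L
  induction L with
  | nil => intro d _ _; simp
  | cons p L ih =>
    intro d hnd hfresh
    have hp : d.contains p.1 = false := hfresh p (by simp)
    rw [List.foldl_cons, PySem.Dict.getD_of_not_contains d [] hp]
    rw [ih _ (by simpa using hnd.of_cons) ?fresh]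
    · rw [PySem.Dict.items_insert_of_not_contains d _ hp]
      simp
    case fresh =>
      intro q hq
      rw [PySem.Dict.contains_insert]
      have hne : q.1 ≠ p.1 := by
        intro hEq
        have := (List.nodup_cons.mp hnd).1
        exact this (hEq ▸ List.mem_map_of_mem hq)
      simp [hne, hfresh q (by simp [hq])]

theorem B_items (e p : List Int) :
    build_adjacency_map_alt e p
    = (((pairsOf (tris e p)).foldl modIdx PySem.Dict.empty).items.foldl
        (fun d q => d.insert q.1 (q.2.foldl (fun s r => occAdd s r.1 r.2) (d.getD q.1 []))) PySem.Dict.empty).items := by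
  show ((((PySem.List.pyRange 0 (PySem.List.len p - 1) 1).foldl _ PySem.Dict.empty).items).foldl _ PySem.Dict.empty).items = _
  rw [B_first e p]
  rfl

theorem main_eq (e p : List Int) :
    build_adjacency_map e p = build_adjacency_map_alt e p := by
  rw [A_items, B_items]
  have hAkeys : ((pairsOf (tris e p)).foldl modOcc PySem.Dict.empty).keys
      = PySem.Set.update (PySem.Dict.empty (κ := Int) (ν := PySem.Set Int)).keys
          ((pairsOf (tris e p)).map (fun q => q.1)) := by
    exact PySem.Dict.keys_foldl_modify_key (pairsOf (tris e p)) (fun q => q.1) []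
      (fun d q => fun s => occAdd s q.2.1 q.2.2) PySem.Dict.empty
  have hAnodup : ((pairsOf (tris e p)).foldl modOcc PySem.Dict.empty).keys.Nodup := by
    exact PySem.Dict.nodup_keys_foldl_modify_key (pairsOf (tris e p)) (fun q => q.1) []
      (fun d q => fun s => occAdd s q.2.1 q.2.2) PySem.Dict.empty PySem.Dict.nodup_keys_empty
  have hOkeys : ((pairsOf (tris e p)).foldl modIdx PySem.Dict.empty).keys
      = PySem.Set.update (PySem.Dict.empty (κ := Int) (ν := List (List Int × Int))).keys
          ((pairsOf (tris e p)).map (fun q => q.1)) := by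
    exact PySem.Dict.keys_foldl_modify_key (pairsOf (tris e p)) (fun q => q.1) []
      (fun d q => fun l => l ++ [q.2]) PySem.Dict.empty
  have hOnodup : ((pairsOf (tris e p)).foldl modIdx PySem.Dict.empty).keys.Nodup := by
    exact PySem.Dict.nodup_keys_foldl_modify_key (pairsOf (tris e p)) (fun q => q.1) []
      (fun d q => fun l => l ++ [q.2]) PySem.Dict.empty PySem.Dict.nodup_keys_empty
  have hAget : ∀ k, ((pairsOf (tris e p)).foldl modOcc PySem.Dict.empty).getD k []
      = ((pairsOf (tris e p)).filter (fun q => q.1 == k)).foldl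
          (fun s q => occAdd s q.2.1 q.2.2) [] := by
    intro k
    have := getD_foldl_modify_fun (fun q s => occAdd s q.2.1 q.2.2)
      (pairsOf (tris e p)) PySem.Dict.empty k
    simpa [modOcc] using this
  have hOget : ∀ k, ((pairsOf (tris e p)).foldl modIdx PySem.Dict.empty).getD k []
      = ((pairsOf (tris e p)).filter (fun q => q.1 == k)).map (fun q => q.2) := by
    intro k
    have := PySem.Dict.getD_foldl_modify_append (pairsOf (tris e p)) PySem.Dict.empty k
    simpa [modIdx] using this
  -- phase 2 of B
  have hfresh : ∀ q ∈ ((pairsOf (tris e p)).foldl modIdx PySem.Dict.empty).items,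
      (PySem.Dict.empty (κ := Int) (ν := PySem.Set Int)).contains q.1 = false :=
    fun q _ => PySem.Dict.contains_empty q.1
  have hnd : ((((pairsOf (tris e p)).foldl modIdx PySem.Dict.empty).items).map Prod.fst).Nodup :=
    hOnodup
  have hB2 : ((((pairsOf (tris e p)).foldl modIdx PySem.Dict.empty).items).foldl
        (fun d q => d.insert q.1 (q.2.foldl (fun s r => occAdd s r.1 r.2) (d.getD q.1 []))) PySem.Dict.empty).items
      = (PySem.Dict.empty (κ := Int) (ν := PySem.Set Int)).items
        ++ (((pairsOf (tris e p)).foldl modIdx PySem.Dict.empty).items).map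
            (fun q => (q.1, q.2.foldl (fun s r => occAdd s r.1 r.2) [])) :=
    items_insert_fresh (fun _ occs s => occs.foldl (fun s r => occAdd s r.1 r.2) s)
      _ _ hnd hfresh
  rw [hB2]
  rw [PySem.Dict.items_eq_map_keys _ hAnodup [],
    PySem.Dict.items_eq_map_keys _ hOnodup []]
  rw [List.map_map, hAkeys, hOkeys]
  simp only [PySem.Dict.keys_empty]
  have hemp : (PySem.Dict.empty (κ := Int) (ν := PySem.Set Int)).items = [] := rfl
  rw [hemp, List.nil_append]
  apply List.map_congr_left
  intro k hk
  simp only [Function.comp_apply, hAget, hOget, List.foldl_map]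

-- ===== VERDICT (by name: the statement is the Claim_ definition above) =====
theorem build_adjacency_map_spec : Claim_equal_build_adjacency_map := by
  intro elem2nodes p_elem2nodes _
  exact main_eq elem2nodes p_elem2nodes
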